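-- pv_equiv track=rewrite | github.com/Mrrm2/advent-of-code | 2023/day9.py | calc
-- ===== SOURCE A (Python) =====
-- def build_right(pyramid: list[list]) -> tuple:
--     curr_right, curr_left = 0, 0
--     for i in range(len(pyramid) - 2, -1, -1):
--         curr_right += pyramid[i][-1]
--         curr_left = pyramid[i][0] - curr_left
--
--     return curr_right, curr_left
--
-- def calc(file: list):
--     right, left = 0, 0
--     pyramids = []
--     for row in file:
--         pyramid = [row]
--         while True:
--             next_row = []
--             for i, val in enumerate(pyramid[-1][:-1]):
--                 next_row.append(pyramid[-1][i + 1] - val)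
--             pyramid.append(next_row)
--             if all(value == 0 for value in next_row):
--                 break
--
--         pyramids.append(pyramid)
--
--     for pyramid in pyramids:
--         r, l = build_right(pyramid)
--         right += r
--         left += l
--
--     return right, left
-- ===== SOURCE B (Python) =====
-- def calc(file: list):
--     def extra(seq):
--         diffs = [seq[i + 1] - seq[i] for i in range(len(seq) - 1)]
--         if all(v == 0 for v in diffs):
--             return seq[-1], seq[0]
--         r, l = extra(diffs)
--         return seq[-1] + r, seq[0] - l
--
--     right, left = 0, 0
--     for row in file:
--         r, l = extra(row)
--         right += r
--         left += l
--     return right, left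
-- ===== Notes on version B (the rewrite author's own statement) =====
-- stated objective: simpler
-- what changed: Replaces the materialized difference pyramid (built row by row and then reverse-iterated by index with build_right) by a single recursive helper over the shrinking difference sequence that returns both extrapolations at once; no pyramid list is stored.
import Mathlib
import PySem

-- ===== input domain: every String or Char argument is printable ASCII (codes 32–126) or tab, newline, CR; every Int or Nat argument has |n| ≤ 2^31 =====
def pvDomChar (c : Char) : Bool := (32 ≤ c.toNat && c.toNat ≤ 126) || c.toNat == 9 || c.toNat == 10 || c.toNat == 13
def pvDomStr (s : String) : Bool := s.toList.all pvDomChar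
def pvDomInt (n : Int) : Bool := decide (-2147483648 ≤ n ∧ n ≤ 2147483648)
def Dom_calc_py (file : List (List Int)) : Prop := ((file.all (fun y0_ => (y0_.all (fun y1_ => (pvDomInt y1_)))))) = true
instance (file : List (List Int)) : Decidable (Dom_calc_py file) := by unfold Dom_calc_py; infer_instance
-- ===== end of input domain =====

-- B replaces A's materialized pyramid list and reverse index loop by one recursive
-- helper on the shrinking difference sequence (objective: simpler; same cost).

-- ===== PORT A =====
-- next_row = [pyramid[-1][i+1] - val for i, val in enumerate(pyramid[-1][:-1])]
-- (Pre_ guarantees the index i+1 is in range, so pyGetD's default is never used)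
def nextRowA (last : List Int) : List Int :=
  (PySem.List.enumerate (PySem.List.slice last none (some (-1)))).foldl
    (fun acc p => acc ++ [PySem.List.pyGetD last (p.1 + 1) 0 - p.2]) []

-- needed by buildLoopA's termination proof
theorem nextRowA_len (l : List Int) : (nextRowA l).length = l.length - 1 := by
  unfold nextRowA
  rw [PySem.List.slice_to_neg_one, PySem.List.foldl_append_singleton_eq_map, List.nil_append]
  simp [PySem.List.length_enumerate]

-- the while-True loop: keep appending difference rows until an all-zero row appears
def buildLoopA (pyramid : List (List Int)) : List (List Int) :=
  let next := nextRowA (PySem.List.pyGetD pyramid (-1) [])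
  if next.all (· == 0) then pyramid ++ [next]
  else buildLoopA (pyramid ++ [next])
termination_by (PySem.List.pyGetD pyramid (-1) ([] : List Int)).length
decreasing_by
  rename_i h
  have hne : next ≠ [] := fun hnil => h (by simp [hnil])
  rw [PySem.List.pyGetD_neg_one_append_singleton pyramid next []]
  have hlen : next.length = (PySem.List.pyGetD pyramid (-1) ([] : List Int)).length - 1 :=
    nextRowA_len _
  have hpos : 0 < next.length := List.length_pos_iff.mpr hne
  omega

-- build_right
def buildRightA (pyramid : List (List Int)) : Int × Int :=
  (PySem.List.pyRange ((pyramid.length : Int) - 2) (-1) (-1)).foldl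
    (fun s i =>
      (s.1 + PySem.List.pyGetD (PySem.List.pyGetD pyramid i []) (-1) 0,
       PySem.List.pyGetD (PySem.List.pyGetD pyramid i []) 0 0 - s.2))
    (0, 0)

def calc_py (file : List (List Int)) : Int × Int :=
  let pyramids := file.foldl (fun acc row => acc ++ [buildLoopA [row]]) []
  pyramids.foldl
    (fun s p =>
      let rl := buildRightA p
      (s.1 + rl.1, s.2 + rl.2))
    (0, 0)

-- ===== PORT B =====
-- extra(seq): recurse on the difference sequence, returning (right, left) at once
def extraB (seq : List Int) : Int × Int :=
  let diffs :=
    (PySem.List.pyRange 0 ((seq.length : Int) - 1) 1).map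
      (fun i => PySem.List.pyGetD seq (i + 1) 0 - PySem.List.pyGetD seq i 0)
  if diffs.all (· == 0) then
    (PySem.List.pyGetD seq (-1) 0, PySem.List.pyGetD seq 0 0)
  else
    let rl := extraB diffs
    (PySem.List.pyGetD seq (-1) 0 + rl.1, PySem.List.pyGetD seq 0 0 - rl.2)
termination_by seq.length
decreasing_by
  rename_i h
  rcases Nat.lt_or_ge seq.length 2 with h2 | h2
  · exact absurd (by
      simp only [diffs]
      simp [PySem.List.pyRange_one_eq_nil (show (seq.length : Int) - 1 ≤ 0 by omega)]) h
  · simp only [List.length_map, PySem.List.length_pyRange_one]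
    omega

def calc_py_alt (file : List (List Int)) : Int × Int :=
  file.foldl
    (fun s row =>
      let rl := extraB row
      (s.1 + rl.1, s.2 + rl.2))
    (0, 0)

-- ===== PRECONDITION & SPEC =====
-- Pre_ excludes files containing an empty row, on which the Python A (and B alike)
-- raises IndexError (pyramid[i][-1] resp. seq[-1] on an empty list).
def Pre_calc_py (file : List (List Int)) : Prop := ∀ row ∈ file, row ≠ []
instance (file : List (List Int)) : Decidable (Pre_calc_py file) := by unfold Pre_calc_py; infer_instance

def pvWitness_calc_py : List (List Int) := [[0, 3, 6, 9, 12, 15], [1, 3, 6, 10, 15, 21], [10, 13, 16, 21, 30, 45]]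

def Spec_calc_py (file : List (List Int)) (out : Int × Int) : Prop := out = calc_py_alt file
instance (file : List (List Int)) (out : Int × Int) : Decidable (Spec_calc_py file out) := by unfold Spec_calc_py; infer_instance

-- ===== CLAIM (what is proved, stated in full; the proofs are below) =====
def Claim_equal_calc_py : Prop := ∀ (file : List (List Int)), Dom_calc_py file → Pre_calc_py file → Spec_calc_py file (calc_py file)

-- ===== LEMMAS AND PROOFS =====

-- the canonical difference row
def dRow (l : List Int) : List Int := List.zipWith (· - ·) l.tail l

theorem dRow_length (l : List Int) : (dRow l).length = l.length - 1 := by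
  simp [dRow]

theorem enumerate_getElem? (xs : List Int) (s : Int) (k : Nat) (h : k < xs.length) :
    (PySem.List.enumerate xs s)[k]? = some (s + k, xs[k]) := by
  induction xs generalizing s k with
  | nil => simp at h
  | cons x xs ih =>
    rw [PySem.List.enumerate_cons]
    cases k with
    | zero => simp
    | succ k =>
      have hk : k < xs.length := by simpa using h
      rw [List.getElem?_cons_succ, ih (s + 1) k hk]
      have : s + 1 + (k : Int) = s + ((k + 1 : Nat) : Int) := by push_cast; ring
      simp only [List.getElem_cons_succ, this]

theorem enumerate_getElem (xs : List Int) (s : Int) (k : Nat) (h : k < xs.length)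
    (h' : k < (PySem.List.enumerate xs s).length) :
    (PySem.List.enumerate xs s)[k] = (s + k, xs[k]) := by
  have h2 := enumerate_getElem? xs s k h
  rw [List.getElem?_eq_getElem h'] at h2
  exact Option.some.inj h2

theorem nextRowA_map (l : List Int) :
    nextRowA l = (PySem.List.enumerate l.dropLast).map
      (fun p => PySem.List.pyGetD l (p.1 + 1) 0 - p.2) := by
  unfold nextRowA
  rw [PySem.List.slice_to_neg_one, PySem.List.foldl_append_singleton_eq_map, List.nil_append]

theorem nextRowA_eq (l : List Int) : nextRowA l = dRow l := by
  rw [nextRowA_map]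
  apply List.ext_getElem
  · simp [PySem.List.length_enumerate, dRow]
  · intro k h1 h2
    have hk : k < l.dropLast.length := by
      simpa [PySem.List.length_enumerate] using h1
    have hk1 : k + 1 < l.length := by
      have := hk; simp at this; omega
    rw [List.getElem_map,
      enumerate_getElem l.dropLast 0 k hk (by simpa [PySem.List.length_enumerate] using hk)]
    have e1 : (0 : Int) + (k : Int) + 1 = ((k + 1 : Nat) : Int) := by push_cast; ring
    rw [e1, PySem.List.pyGetD_natCast]
    have g1 : l[k + 1]? = some l[k + 1] := List.getElem?_eq_getElem hk1
    simp [dRow, List.getElem_dropLast, List.getElem_tail, hk1]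

theorem diffsB_eq (l : List Int) :
    (PySem.List.pyRange 0 ((l.length : Int) - 1) 1).map
      (fun i => PySem.List.pyGetD l (i + 1) 0 - PySem.List.pyGetD l i 0) = dRow l := by
  apply List.ext_getElem
  · simp [PySem.List.length_pyRange_one, dRow]
  · intro k h1 h2
    have hk1 : k + 1 < l.length := by
      simp [PySem.List.length_pyRange_one] at h1; omega
    rw [List.getElem_map, PySem.List.getElem_pyRange_one]
    have e1 : (0 : Int) + (k : Int) + 1 = ((k + 1 : Nat) : Int) := by push_cast; ring
    have e2 : (0 : Int) + (k : Int) = ((k : Nat) : Int) := by omega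
    rw [e1, e2, PySem.List.pyGetD_natCast, PySem.List.pyGetD_natCast]
    have g1 : l[k + 1]? = some l[k + 1] := List.getElem?_eq_getElem hk1
    have g2 : l[k]? = some l[k] := List.getElem?_eq_getElem (by omega)
    simp [dRow, g2, List.getElem_tail, hk1]

-- the chain of difference rows the while-loop appends after the seed row
def chainP (l : List Int) : List (List Int) :=
  let next := dRow l
  if next.all (· == 0) then [next] else next :: chainP next
termination_by l.length
decreasing_by
  rename_i h
  have hne : dRow l ≠ [] := fun hnil => h (by simp only [next]; simp [hnil])
  have hpos : 0 < (dRow l).length := List.length_pos_iff.mpr hne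
  have := dRow_length l
  omega

theorem chainP_unfold (l : List Int) :
    chainP l = if (dRow l).all (· == 0) then [dRow l] else dRow l :: chainP (dRow l) := by
  rw [chainP.eq_def]

theorem extraB_unfold (seq : List Int) :
    extraB seq = if (dRow seq).all (· == 0)
      then (PySem.List.pyGetD seq (-1) 0, PySem.List.pyGetD seq 0 0)
      else (PySem.List.pyGetD seq (-1) 0 + (extraB (dRow seq)).1,
            PySem.List.pyGetD seq 0 0 - (extraB (dRow seq)).2) := by
  conv_lhs => rw [extraB.eq_def]
  simp only [diffsB_eq]

theorem buildLoopA_eq_chain (pyramid : List (List Int)) :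
    buildLoopA pyramid = pyramid ++ chainP (PySem.List.pyGetD pyramid (-1) []) := by
  induction pyramid using buildLoopA.induct with
  | case1 pyramid next h =>
    rw [buildLoopA]
    simp only [next] at h ⊢
    rw [if_pos h]
    conv_rhs => rw [chainP_unfold]
    rw [← nextRowA_eq, if_pos h]
  | case2 pyramid next h ih =>
    rw [buildLoopA]
    simp only [next] at h ih ⊢
    rw [if_neg h, ih, PySem.List.pyGetD_neg_one_append_singleton]
    conv_rhs => rw [chainP_unfold]
    rw [← nextRowA_eq, if_neg h]
    simp

-- build_right is a left fold of `stepP` over the reversed pyramid minus its last row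
def stepP (s : Int × Int) (row : List Int) : Int × Int :=
  (s.1 + PySem.List.pyGetD row (-1) 0, PySem.List.pyGetD row 0 0 - s.2)

theorem brAux (p : List (List Int)) (m : Nat) (hm : m ≤ p.length) (init : Int × Int) :
    (PySem.List.pyRange ((m : Int) - 1) (-1) (-1)).foldl
      (fun s i =>
        (s.1 + PySem.List.pyGetD (PySem.List.pyGetD p i []) (-1) 0,
         PySem.List.pyGetD (PySem.List.pyGetD p i []) 0 0 - s.2)) init
    = ((p.take m).reverse).foldl stepP init := by
  induction m generalizing init with
  | zero =>
    rw [PySem.List.pyRange_neg_one_eq_nil (by norm_num)]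
    simp
  | succ m ih =>
    have e : ((m + 1 : Nat) : Int) - 1 = (m : Int) := by push_cast; ring
    have hm' : m < p.length := hm
    rw [e, PySem.List.pyRange_neg_one_cons (by omega), List.foldl_cons]
    have e2 : (m : Int) - 1 = ((m : Nat) : Int) - 1 := rfl
    rw [e2, ih (Nat.le_of_lt hm')]
    have hget : PySem.List.pyGetD p ((m : Nat) : Int) [] = p[m] := by
      rw [PySem.List.pyGetD_natCast, List.getD_eq_getElem _ _ hm']
    rw [List.take_add_one, List.getElem?_eq_getElem hm']
    simp only [Option.toList_some, List.reverse_append, List.reverse_cons, List.reverse_nil,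
      List.nil_append, List.singleton_append, List.foldl_cons, hget, stepP]

theorem buildRightA_fold (p : List (List Int)) :
    buildRightA p = p.dropLast.reverse.foldl stepP (0, 0) := by
  unfold buildRightA
  cases p with
  | nil =>
    rw [PySem.List.pyRange_neg_one_eq_nil (by norm_num)]
    simp
  | cons x xs =>
    have e : ((x :: xs).length : Int) - 2 = (((x :: xs).length - 1 : Nat) : Int) - 1 := by
      simp; ring
    rw [e, brAux (x :: xs) ((x :: xs).length - 1) (by omega), ← List.dropLast_eq_take]

theorem fold_chain_eq_extraB (seq : List Int) :
    ((seq :: chainP seq).dropLast.reverse.foldl stepP (0, 0)) = extraB seq := by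
  induction seq using chainP.induct with
  | case1 seq next hall =>
    simp only [next] at hall
    rw [chainP_unfold, if_pos hall, extraB_unfold, if_pos hall]
    simp [stepP]
  | case2 seq next hall ih =>
    simp only [next] at hall ih
    rw [chainP_unfold, if_neg hall, extraB_unfold, if_neg hall]
    rw [List.dropLast_cons_of_ne_nil (by simp), List.reverse_cons, List.foldl_append, ih]
    simp only [List.foldl_cons, List.foldl_nil, stepP]
    rw [Int.add_comm]

theorem row_eq (seq : List Int) : buildRightA (buildLoopA [seq]) = extraB seq := by
  rw [buildLoopA_eq_chain [seq]]
  have h1 : PySem.List.pyGetD [seq] (-1) ([] : List Int) = seq := by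
    simpa using PySem.List.pyGetD_neg_one_append_singleton ([] : List (List Int)) seq []
  rw [h1, buildRightA_fold]
  exact fold_chain_eq_extraB seq

-- ===== VERDICT (by name: the statement is the Claim_ definition above) =====
theorem calc_py_spec : Claim_equal_calc_py := by
  intro file _ _
  unfold Spec_calc_py
  simp only [calc_py, calc_py_alt]
  rw [PySem.List.foldl_append_singleton_eq_map, List.nil_append, List.foldl_map]
  have hf : (fun (s : Int × Int) (row : List Int) =>
        (s.1 + (buildRightA (buildLoopA [row])).1, s.2 + (buildRightA (buildLoopA [row])).2))
      = (fun (s : Int × Int) (row : List Int) =>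
        (s.1 + (extraB row).1, s.2 + (extraB row).2)) := by
    funext s row
    rw [row_eq]
  rw [hf]
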